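-- pv_equiv track=rewrite | github.com/BrainTech/openbci | exps/ventures/analysis/next_markers.py | get_info_from_filename
-- ===== SOURCE A (Python) =====
-- def get_info_from_filename(filename):
--     username = ' '
--     prefix = ''
--     i = 0
--     for iter in range(0, len(filename)):
--         if filename[iter] == '/':
--             i += 1
--         if i == 3:
--             prefix +=filename[iter]
--         if i == 4:
--             username = filename[iter+1:iter+5]
--             break
--     prefix = prefix[1:]
--     return username, prefix
-- ===== SOURCE B (Python) =====
-- def get_info_from_filename(filename):
--     # Skip past the first three '/' using C-level str.find on successive suffixes.
--     rest = filename
--     for _ in range(3):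
--         k = rest.find('/')
--         if k == -1:
--             return ' ', ''
--         rest = rest[k+1:]
--     q = rest.find('/')
--     if q == -1:
--         return ' ', rest
--     return rest[q+1:q+5], rest[:q]
-- ===== Notes on version B (the rewrite author's own statement) =====
-- stated objective: idiomatic
-- what changed: Replaced A's index loop with slash counter and per-character prefix accumulation by three find-and-drop jumps over successive suffixes (C-level str.find) plus direct slices for prefix and username.
import Mathlib
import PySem

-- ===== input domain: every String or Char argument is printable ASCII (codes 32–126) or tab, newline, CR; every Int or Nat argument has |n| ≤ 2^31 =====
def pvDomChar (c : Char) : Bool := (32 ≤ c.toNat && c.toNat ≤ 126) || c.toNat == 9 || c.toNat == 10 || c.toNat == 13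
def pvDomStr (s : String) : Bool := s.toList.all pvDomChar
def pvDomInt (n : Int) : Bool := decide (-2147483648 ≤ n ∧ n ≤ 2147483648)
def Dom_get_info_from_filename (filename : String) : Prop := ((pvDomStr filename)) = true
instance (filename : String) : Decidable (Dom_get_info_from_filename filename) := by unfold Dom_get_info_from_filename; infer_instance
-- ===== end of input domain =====

-- B replaces A's char-by-char index/counter scan by three find-and-drop jumps over suffixes (idiomatic, C-level str.find in Python).

-- ===== PORT A =====
-- A's for-loop over indices, as structural recursion on the remaining characters `rest`
-- with the absolute position `pos` (= iter), slash counter `i` and accumulated `prefix`.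
def getInfoLoopA (full : List Char) (rest : List Char) (pos : Nat) (i : Nat)
    (pre : List Char) : List Char × List Char :=
  match rest with
  | [] => ([' '], pre)                 -- loop ends: username stays ' ', prefix as accumulated
  | c :: cs =>
    let i' := if c = '/' then i + 1 else i
    let pre' := if i' = 3 then pre ++ [c] else pre
    if i' = 4 then
      (PySem.List.slice full (some ((pos : Int) + 1)) (some ((pos : Int) + 5)), pre')  -- filename[iter+1:iter+5]; break
    else
      getInfoLoopA full cs (pos + 1) i' pre'

def get_info_from_filename (filename : String) : String × String :=
  let fl := filename.toList
  let r := getInfoLoopA fl fl 0 0 []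
  (String.ofList r.1, String.ofList (PySem.List.slice r.2 (some 1) none))   -- prefix = prefix[1:]

-- ===== PORT B =====
-- one `rest = rest[k+1:]` step of B's for-loop: none = ('/' not found, return ' ', '')
def altSkipSlash (rest : List Char) : Option (List Char) :=
  let k := PySem.Chars.find rest ['/']
  if k = -1 then none else some (PySem.List.slice rest (some (k + 1)) none)

-- B's `for _ in range(3)` loop
def altSkip3 : Nat → List Char → Option (List Char)
  | 0, rest => some rest
  | n + 1, rest =>
    match altSkipSlash rest with
    | none => none
    | some r => altSkip3 n r

def get_info_from_filename_alt (filename : String) : String × String :=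
  match altSkip3 3 filename.toList with
  | none => (" ", "")
  | some rest =>
    let q := PySem.Chars.find rest ['/']
    if q = -1 then (" ", String.ofList rest)
    else (String.ofList (PySem.List.slice rest (some (q + 1)) (some (q + 5))),
          String.ofList (PySem.List.slice rest none (some q)))

-- ===== PRECONDITION & SPEC =====
def Spec_get_info_from_filename (filename : String) (out : String × String) : Prop := out = get_info_from_filename_alt filename
instance (filename : String) (out : String × String) : Decidable (Spec_get_info_from_filename filename out) := by unfold Spec_get_info_from_filename; infer_instance

-- ===== CLAIM (what is proved, stated in full; the proofs are below) =====
def Claim_equal_get_info_from_filename : Prop := ∀ (filename : String), Dom_get_info_from_filename filename → Spec_get_info_from_filename filename (get_info_from_filename filename)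

-- ===== LEMMAS AND PROOFS =====

-- `find` with the one-character needle ['/'] is the first index of '/', or -1.
theorem find_slash_go (cs : List Char) (k : Nat) :
    PySem.Chars.find.go ['/'] cs k =
      match cs.idxOf? '/' with
      | none => -1
      | some j => ((k + j : Nat) : Int) := by
  induction cs generalizing k with
  | nil => simp [PySem.Chars.find.go, List.idxOf?]
  | cons c cs ih =>
    by_cases hc : c = '/'
    · subst hc
      simp [PySem.Chars.find.go, List.idxOf?, List.findIdx?_cons]
    · rw [PySem.Chars.find.go]
      have hpre : List.isPrefixOf ['/'] (c :: cs) = false := by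
        simp [List.isPrefixOf]
        exact fun h => hc h.symm
      simp only [hpre, Bool.false_eq_true, if_false, ih]
      cases h : cs.idxOf? '/' with
      | none =>
        simp only [List.idxOf?] at h
        simp [List.idxOf?, List.findIdx?_cons, hc, h]
      | some j =>
        simp only [List.idxOf?] at h
        simp [List.idxOf?, List.findIdx?_cons, hc, h]
        ring

theorem find_slash (cs : List Char) :
    PySem.Chars.find cs ['/'] =
      match cs.idxOf? '/' with
      | none => -1
      | some j => (j : Int) := by
  have := find_slash_go cs 0
  simpa [PySem.Chars.find] using this

-- A's loop in a skip phase (i ≤ 2, prefix still []): it jumps to just past the next '/'.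
theorem loopA_skip (full rest : List Char) (pos i : Nat) (hi : i ≤ 2) :
    getInfoLoopA full rest pos i [] =
      match rest.idxOf? '/' with
      | none => ([' '], [])
      | some k => getInfoLoopA full (rest.drop (k + 1)) (pos + k + 1) (i + 1)
          (if i = 2 then ['/'] else []) := by
  induction rest generalizing pos with
  | nil => simp [getInfoLoopA, List.idxOf?]
  | cons c cs ih =>
    by_cases hc : c = '/'
    · subst hc
      have h4 : ¬ (i + 1 = 4) := by omega
      simp [getInfoLoopA, List.idxOf?, List.findIdx?_cons, h4]
    · have hcs : ¬ ('/' = c) := fun h => hc (Eq.symm h)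
      have h3 : ¬ (i = 3) := by omega
      have h4 : ¬ (i = 4) := by omega
      have hidx : (c :: cs).idxOf? '/' = (cs.idxOf? '/').map (· + 1) := by
        simp [List.idxOf?, List.findIdx?_cons, hc]
      simp only [getInfoLoopA, hc, if_false, h3, h4]
      rw [ih (pos + 1), hidx]
      cases h : cs.idxOf? '/' with
      | none => simp
      | some k =>
        simp only [Option.map_some]
        have e1 : pos + 1 + k + 1 = pos + (k + 1) + 1 := by omega
        have e2 : cs.drop (k + 1) = (c :: cs).drop (k + 1 + 1) := by simp
        rw [e1, e2]

-- A's loop in phase i = 3: collects prefix chars up to the next '/', then breaks with the slice.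
theorem loopA_phase3 (full rest : List Char) (pos : Nat) (pre : List Char) :
    getInfoLoopA full rest pos 3 pre =
      match rest.idxOf? '/' with
      | none => ([' '], pre ++ rest)
      | some k => (PySem.List.slice full (some ((pos : Int) + (k : Int) + 1))
          (some ((pos : Int) + (k : Int) + 5)), pre ++ rest.take k) := by
  induction rest generalizing pos pre with
  | nil => simp [getInfoLoopA, List.idxOf?]
  | cons c cs ih =>
    by_cases hc : c = '/'
    · subst hc
      simp [getInfoLoopA, List.idxOf?, List.findIdx?_cons]
    · have hcs : ¬ ('/' = c) := fun h => hc (Eq.symm h)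
      have hidx : (c :: cs).idxOf? '/' = (cs.idxOf? '/').map (· + 1) := by
        simp [List.idxOf?, List.findIdx?_cons, hc]
      simp only [getInfoLoopA, hc, if_false, ite_true]
      rw [ih (pos + 1) (pre ++ [c]), hidx]
      cases h : cs.idxOf? '/' with
      | none => simp
      | some k =>
        simp only [Option.map_some]
        have e1 : ((pos + 1 : Nat) : Int) + (k : Int) = (pos : Int) + ((k + 1 : Nat) : Int) := by
          push_cast; ring
        rw [e1]
        simp [List.take_succ_cons]

-- B's one skip step, in idxOf? form.
theorem altSkipSlash_eq (rest : List Char) :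
    altSkipSlash rest =
      match rest.idxOf? '/' with
      | none => none
      | some k => some (rest.drop (k + 1)) := by
  unfold altSkipSlash
  rw [find_slash]
  cases h : rest.idxOf? '/' with
  | none => simp
  | some k =>
    have hne : ((k : Int)) ≠ -1 := by omega
    have hcast : ((k : Int) + 1) = (((k + 1 : Nat)) : Int) := by push_cast; ring
    simp only [hne, if_false, hcast, PySem.List.slice_from_natCast]

-- The composed claim, by induction on the number of remaining skips.
theorem main_aux (full : List Char) (n : Nat) (rest : List Char) (pos : Nat)
    (hn : n ≤ 3) (hd : full.drop pos = rest) :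
    (String.ofList (getInfoLoopA full rest pos (3 - n) (if n = 0 then ['/'] else [])).1,
     String.ofList (PySem.List.slice
        (getInfoLoopA full rest pos (3 - n) (if n = 0 then ['/'] else [])).2 (some 1) none)) =
      (match altSkip3 n rest with
       | none => (" ", "")
       | some rest' =>
         let q := PySem.Chars.find rest' ['/']
         if q = -1 then (" ", String.ofList rest')
         else (String.ofList (PySem.List.slice rest' (some (q + 1)) (some (q + 5))),
               String.ofList (PySem.List.slice rest' none (some q)))) := by
  induction n generalizing rest pos with
  | zero =>
    simp only [Nat.sub_zero, altSkip3]
    rw [loopA_phase3, find_slash]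
    cases h : rest.idxOf? '/' with
    | none =>
      simp [PySem.List.slice_from_one]
    | some q =>
      have hne : ((q : Int)) ≠ -1 := by omega
      simp only [hne, if_false]
      have e1 : PySem.List.slice full (some ((pos : Int) + (q : Int) + 1))
          (some ((pos : Int) + (q : Int) + 5)) = (rest.drop (q + 1)).take 4 := by
        have c1 : ((pos : Int) + (q : Int) + 1) = (((pos + q + 1 : Nat)) : Int) := by push_cast; ring
        have c2 : ((pos : Int) + (q : Int) + 5) = (((pos + q + 1 + 4 : Nat)) : Int) := by push_cast; ring
        rw [c1, c2, PySem.List.slice_natCast]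
        have e0 : pos + q + 1 + 4 - (pos + q + 1) = 4 := by omega
        rw [e0, ← hd, List.drop_drop]
        congr 1
      have e2 : PySem.List.slice rest (some ((q : Int) + 1)) (some ((q : Int) + 5)) =
          (rest.drop (q + 1)).take 4 := by
        have c1 : ((q : Int) + 1) = (((q + 1 : Nat)) : Int) := by push_cast; ring
        have c2 : ((q : Int) + 5) = (((q + 1 + 4 : Nat)) : Int) := by push_cast; ring
        rw [c1, c2, PySem.List.slice_natCast]
        congr 1
        omega
      have e3 : PySem.List.slice rest none (some ((q : Int))) = rest.take q :=
        PySem.List.slice_to_natCast rest q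
      simp only [e1, e2, e3, PySem.List.slice_from_one]
      simp
  | succ m ihm =>
    have hi : 3 - (m + 1) ≤ 2 := by omega
    have h0 : ¬ (m + 1 = 0) := by omega
    simp only [h0, if_false]
    rw [loopA_skip full rest pos (3 - (m + 1)) hi]
    simp only [altSkip3, altSkipSlash_eq]
    cases h : rest.idxOf? '/' with
    | none => rfl
    | some k =>
      have e4 : 3 - (m + 1) + 1 = 3 - m := by omega
      have e5 : (if 3 - (m + 1) = 2 then (['/'] : List Char) else []) =
          (if m = 0 then ['/'] else []) := by
        split_ifs with h1 h2 <;> first | rfl | (exfalso; omega)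
      rw [e4, e5]
      exact ihm (rest.drop (k + 1)) (pos + k + 1) (by omega)
        (by rw [← hd, List.drop_drop]; congr 1)

theorem get_info_from_filename_spec : Claim_equal_get_info_from_filename := by
  intro filename _
  unfold Spec_get_info_from_filename get_info_from_filename get_info_from_filename_alt
  have h := main_aux filename.toList 3 filename.toList 0 (by omega) (by simp)
  simpa using h
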